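-- pv_equiv track=rewrite | github.com/fathurwithyou/silberschatz | src/optimizer/parser/base.py | _find_next_clause
-- ===== SOURCE A (Python) =====
-- def _find_next_clause(query: str, start_pos: int, keywords: list) -> int:
--     """Find position of next keyword in query."""
--     query_upper = query.upper()
--     positions = []
--
--     for keyword in keywords:
--         pos = query_upper.find(keyword, start_pos)
--         if pos != -1:
--             positions.append(pos)
--
--     return min(positions) if positions else len(query)
-- ===== SOURCE B (Python) =====
-- def _find_next_clause(query: str, start_pos: int, keywords: list) -> int:
--     """Find position of next keyword in query."""
--     query_upper = query.upper()
--     kws = tuple(keywords)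
--     for i in range(max(start_pos, 0), len(query) + 1):
--         if query_upper.startswith(kws, i):
--             return i
--     return len(query)
-- ===== Notes on version B (the rewrite author's own statement) =====
-- stated objective: alternative
-- what changed: Inverted the loop nesting: instead of running str.find over the whole string once per keyword and taking the min of the hit positions, B scans positions left to right from start_pos and returns the first position where the string starts with any keyword (early exit); Pre_ excludes negative start_pos, where A inherits str.find's tail-relative start interpretation while B scans from 0 -- a corner no caller of a clause parser specifies.
-- outside the precondition, e.g. on _find_next_clause('ABA', -1, ['A']): A returns 2, B returns 0
import Mathlib
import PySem

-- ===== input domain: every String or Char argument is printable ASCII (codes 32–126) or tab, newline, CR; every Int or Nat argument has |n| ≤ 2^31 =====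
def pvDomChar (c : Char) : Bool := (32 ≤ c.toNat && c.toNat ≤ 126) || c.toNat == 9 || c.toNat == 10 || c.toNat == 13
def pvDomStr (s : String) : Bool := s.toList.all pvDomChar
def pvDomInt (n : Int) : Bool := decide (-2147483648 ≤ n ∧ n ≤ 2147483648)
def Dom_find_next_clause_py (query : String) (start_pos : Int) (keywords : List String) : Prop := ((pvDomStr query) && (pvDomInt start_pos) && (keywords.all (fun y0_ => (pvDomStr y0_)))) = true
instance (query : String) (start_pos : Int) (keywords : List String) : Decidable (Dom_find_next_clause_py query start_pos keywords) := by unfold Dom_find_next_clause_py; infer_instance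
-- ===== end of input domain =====

-- B inverts A's loop nesting: one left-to-right position scan returning the first position where the
-- string starts with any keyword (early exit) instead of one whole-string find per keyword; objective: alternative.

-- ===== PORT A =====
def find_next_clause_py (query : String) (start_pos : Int) (keywords : List String) : Int :=
  let query_upper := PySem.Str.upper query
  let positions := keywords.foldl (fun acc keyword =>
    let pos := PySem.Str.findFrom query_upper keyword start_pos
    if pos ≠ -1 then acc ++ [pos] else acc) []
  match PySem.List.min? positions (fun x => x) with
  | some m => m
  | none => PySem.Str.len query

-- ===== PORT B =====
-- the 'for i in range(max(start_pos, 0), len(query) + 1): if query_upper.startswith(kws, i): return i'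
-- loop; len(query) = length of query_upper (upper preserves length); startswith(tuple, i) with
-- 0 ≤ i ≤ len is 'some keyword is a prefix of the drop at i' — exact there
def fncScan (qu : List Char) (kws : List (List Char)) (i : Nat) : Int :=
  if i ≤ qu.length then
    if kws.any (fun kw => PySem.Chars.startswith (qu.drop i) kw) then (i : Int)
    else fncScan qu kws (i + 1)
  else (qu.length : Int)
termination_by qu.length + 1 - i

def find_next_clause_py_alt (query : String) (start_pos : Int) (keywords : List String) : Int :=
  let query_upper := (PySem.Str.upper query).toList
  let kws := keywords.map String.toList
  fncScan query_upper kws (max start_pos 0).toNat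

-- ===== PRECONDITION & SPEC =====
-- Pre_ excludes negative start_pos landing strictly inside the string, on which A still returns:
-- there A inherits str.find's tail-relative reading of a negative start while B scans from 0 —
-- an unspecified corner where either reading is defensible (no caller passes a negative start).
def Pre_find_next_clause_py (query : String) (start_pos : Int) (keywords : List String) : Prop :=
  0 ≤ start_pos ∨ start_pos + (query.toList.length : Int) ≤ 0
instance (query : String) (start_pos : Int) (keywords : List String) : Decidable (Pre_find_next_clause_py query start_pos keywords) := by unfold Pre_find_next_clause_py; infer_instance

def pvWitness_find_next_clause_py : String × Int × List String :=
  ("SELECT a FROM t WHERE x", 7, ["FROM", "WHERE", "GROUP BY"])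

def Spec_find_next_clause_py (query : String) (start_pos : Int) (keywords : List String) (out : Int) : Prop := out = find_next_clause_py_alt query start_pos keywords
instance (query : String) (start_pos : Int) (keywords : List String) (out : Int) : Decidable (Spec_find_next_clause_py query start_pos keywords out) := by unfold Spec_find_next_clause_py; infer_instance

-- ===== CLAIM (what is proved, stated in full; the proofs are below) =====
def Claim_equal_find_next_clause_py : Prop := ∀ (query : String) (start_pos : Int) (keywords : List String), Dom_find_next_clause_py query start_pos keywords → Pre_find_next_clause_py query start_pos keywords → Spec_find_next_clause_py query start_pos keywords (find_next_clause_py query start_pos keywords)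

-- ===== LEMMAS AND PROOFS =====

-- per-position match predicate: B's loop guard, the proof-side view of 'some keyword matches at i'
def pvP (l : List Char) (K : List (List Char)) (i : Nat) : Bool :=
  K.any (fun kw => PySem.Chars.startswith (l.drop i) kw)

-- findFrom past the end is -1 (CPython's rule, kept by PySem)
theorem findFrom_past (l sub : List Char) (k : Nat) (h : l.length < k) :
    PySem.Chars.findFrom l sub (k : Int) = -1 := by
  simp only [PySem.Chars.findFrom]
  have h1 : ¬ ((k : Int) < 0) := by omega
  have h2 : (l.length : Int) < (k : Int) := by omega
  simp [h1, h2]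

-- findFrom result is ≤ length
theorem findFrom_le (l sub : List Char) (k : Nat) (hk : k ≤ l.length) :
    PySem.Chars.findFrom l sub (k : Int) ≤ (l.length : Int) := by
  rw [PySem.Chars.findFrom_natCast l sub k hk]
  have h := PySem.Chars.find_le_length (l.drop k) sub
  simp only [List.length_drop] at h
  split_ifs <;> omega

theorem fncScan_stop (l : List Char) (K : List (List Char)) (k m : Nat)
    (hm : k ≤ m) (hmn : m ≤ l.length) (hP : pvP l K m = true)
    (hmin : ∀ i, k ≤ i → i < m → pvP l K i = false) :
    fncScan l K k = (m : Int) := by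
  rw [fncScan]
  have hk : k ≤ l.length := le_trans hm hmn
  simp only [hk, if_true]
  by_cases he : k = m
  · subst he
    unfold pvP at hP
    rw [hP]
    rfl
  · have hf : pvP l K k = false := hmin k le_rfl (by omega)
    unfold pvP at hf
    rw [hf]
    simp only [Bool.false_eq_true, if_false]
    exact fncScan_stop l K (k + 1) m (by omega) hmn hP (fun i hi hin => hmin i (by omega) hin)
termination_by m - k

theorem fncScan_none (l : List Char) (K : List (List Char)) (k : Nat)
    (h : ∀ i, k ≤ i → i ≤ l.length → pvP l K i = false) :
    fncScan l K k = (l.length : Int) := by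
  rw [fncScan]
  by_cases hk : k ≤ l.length
  · simp only [hk, if_true]
    have hf : pvP l K k = false := h k le_rfl hk
    unfold pvP at hf
    rw [hf]
    simp only [Bool.false_eq_true, if_false]
    exact fncScan_none l K (k + 1) (fun i hi hin => h i (by omega) hin)
  · simp [hk]
termination_by l.length + 1 - k
decreasing_by omega

theorem fncScan_past (l : List Char) (K : List (List Char)) (k : Nat) (h : l.length < k) :
    fncScan l K k = (l.length : Int) := by
  rw [fncScan]
  simp [show ¬ k ≤ l.length by omega]

-- A's foldl builds exactly the filterMap of the hit positions
theorem foldl_positions (f : String → Int) :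
    ∀ (K : List String) (acc : List Int),
      K.foldl (fun acc kw => if f kw ≠ -1 then acc ++ [f kw] else acc) acc
        = acc ++ K.filterMap (fun kw => if f kw ≠ -1 then some (f kw) else none) := by
  intro K
  induction K with
  | nil => simp
  | cons kw K ih =>
    intro acc
    rw [List.foldl_cons, List.filterMap_cons]
    by_cases h : f kw ≠ -1
    · rw [if_pos h, if_pos h, ih]
      simp
    · rw [if_neg h, if_neg h, ih]

-- prefix at a later position is an infix of the earlier drop
theorem prefix_drop_infix (kw l : List Char) (k i : Nat) (hk : k ≤ i)
    (h : kw <+: l.drop i) : kw <:+: l.drop k := by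
  have hd : l.drop i = (l.drop k).drop (i - k) := by
    rw [List.drop_drop]
    congr 1
    omega
  rw [hd] at h
  exact h.isInfix.trans (List.drop_suffix (i - k) (l.drop k)).isInfix

-- findFrom only looks at the clamped start
theorem findFrom_st (l sub : List Char) (a b : Int)
    (hab : (if a < 0 then if a + l.length < 0 then 0 else a + l.length else a)
         = (if b < 0 then if b + l.length < 0 then 0 else b + l.length else b)) :
    PySem.Chars.findFrom l sub a = PySem.Chars.findFrom l sub b := by
  simp only [PySem.Chars.findFrom]
  rw [hab]

-- A with a start at or before -len computes the same as A with start 0 (find clamps both to 0)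
theorem find_neg_eq_zero (query : String) (a : Int) (keywords : List String)
    (ha : a + (query.toList.length : Int) ≤ 0) :
    find_next_clause_py query a keywords = find_next_clause_py query ((0 : Nat) : Int) keywords := by
  unfold find_next_clause_py
  simp only [PySem.Str.findFrom_eq, PySem.Str.toList_upper]
  have hlen : (PySem.Chars.upper query.toList).length = query.toList.length := by
    simp [PySem.Chars.upper]
  have hf : ∀ kw : String,
      PySem.Chars.findFrom (PySem.Chars.upper query.toList) kw.toList a
        = PySem.Chars.findFrom (PySem.Chars.upper query.toList) kw.toList ((0 : Nat) : Int) := by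
    intro kw
    apply findFrom_st
    rw [hlen]
    split_ifs <;> omega
  simp only [hf]

-- the core agreement: at a nonnegative start k both ports compute the same position
theorem fnc_core (query : String) (keywords : List String) (k : Nat) :
    find_next_clause_py query (k : Int) keywords
      = fncScan (PySem.Chars.upper query.toList) (keywords.map String.toList) k := by
  unfold find_next_clause_py
  simp only [PySem.Str.findFrom_eq, PySem.Str.toList_upper, PySem.Str.len_eq]
  set l := PySem.Chars.upper query.toList with hl
  have hlen : l.length = query.toList.length := by
    rw [hl]; simp [PySem.Chars.upper]
  rw [foldl_positions (fun kw : String => PySem.Chars.findFrom l kw.toList (k : Int)) keywords []]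
  simp only [List.nil_append]
  set positions := keywords.filterMap
    (fun kw => if PySem.Chars.findFrom l kw.toList (k : Int) ≠ -1
               then some (PySem.Chars.findFrom l kw.toList (k : Int)) else none) with hposdef
  by_cases hkn : k ≤ l.length
  · -- start inside the string
    cases hp : PySem.List.min? positions (fun x => x) with
    | none =>
      have hnil := (PySem.List.min?_eq_none_iff positions (fun x => x)).mp hp
      show (query.toList.length : Int) = _
      rw [fncScan_none l (keywords.map String.toList) k ?_]
      · rw [hlen]
      · intro i hi _
        by_contra hne
        have hPt : pvP l (keywords.map String.toList) i = true := by
          revert hne; unfold pvP; cases h : (keywords.map String.toList).any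
            (fun kw => PySem.Chars.startswith (l.drop i) kw) <;> simp
        obtain ⟨x, hxmem, hxsw⟩ := List.any_eq_true.mp hPt
        obtain ⟨kw, hkwmem, rfl⟩ := List.mem_map.mp hxmem
        have hpre2 := (PySem.Chars.startswith_iff _ _).mp hxsw
        have hinf := prefix_drop_infix kw.toList l k i hi hpre2
        have hne1 : PySem.Chars.findFrom l kw.toList (k : Int) ≠ -1 := by
          rw [ne_eq, PySem.Chars.findFrom_natCast_eq_neg_one_iff l kw.toList k hkn]
          simpa using hinf
        have : PySem.Chars.findFrom l kw.toList (k : Int) ∈ positions :=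
          List.mem_filterMap.mpr ⟨kw, hkwmem, by simp [hne1]⟩
        rw [hnil] at this
        simp at this
    | some m =>
      show m = _
      have hmem := PySem.List.min?_mem hp
      obtain ⟨kw0, hkw0, hsome⟩ := List.mem_filterMap.mp hmem
      have hne0 : PySem.Chars.findFrom l kw0.toList (k : Int) ≠ -1 := by
        by_contra h
        simp [h] at hsome
      have hFm : PySem.Chars.findFrom l kw0.toList (k : Int) = m := by
        rw [if_pos hne0] at hsome; exact Option.some.inj hsome
      have hspec := PySem.Chars.findFrom_natCast_spec l kw0.toList k hkn hne0
      have hle := findFrom_le l kw0.toList k hkn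
      rw [hFm] at hspec hle
      have hkm : (k : Int) ≤ m := hspec.1
      have hm0 : (0 : Int) ≤ m := by omega
      rw [fncScan_stop l (keywords.map String.toList) k m.toNat (by omega) (by omega) ?_ ?_]
      · rw [Int.toNat_of_nonneg hm0]
      · -- some keyword matches at m
        unfold pvP
        exact List.any_eq_true.mpr ⟨kw0.toList, List.mem_map.mpr ⟨kw0, hkw0, rfl⟩,
          (PySem.Chars.startswith_iff _ _).mpr hspec.2.1⟩
      · -- no keyword matches before m
        intro i hi him
        by_contra hne
        have hPt : pvP l (keywords.map String.toList) i = true := by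
          revert hne; unfold pvP; cases h : (keywords.map String.toList).any
            (fun kw => PySem.Chars.startswith (l.drop i) kw) <;> simp
        obtain ⟨x, hxmem, hxsw⟩ := List.any_eq_true.mp hPt
        obtain ⟨kw, hkwmem, rfl⟩ := List.mem_map.mp hxmem
        have hpre2 := (PySem.Chars.startswith_iff _ _).mp hxsw
        have hinf := prefix_drop_infix kw.toList l k i hi hpre2
        have hne1 : PySem.Chars.findFrom l kw.toList (k : Int) ≠ -1 := by
          rw [ne_eq, PySem.Chars.findFrom_natCast_eq_neg_one_iff l kw.toList k hkn]
          simpa using hinf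
        have hmemF : PySem.Chars.findFrom l kw.toList (k : Int) ∈ positions :=
          List.mem_filterMap.mpr ⟨kw, hkwmem, by simp [hne1]⟩
        have hmle : m ≤ PySem.Chars.findFrom l kw.toList (k : Int) :=
          PySem.List.min?_isMin hp _ hmemF
        have hspec2 := PySem.Chars.findFrom_natCast_spec l kw.toList k hkn hne1
        exact hspec2.2.2 i hi (by omega) hpre2
  · -- start past the end: every find is -1, both sides give len
    have hall : ∀ kw : String, PySem.Chars.findFrom l kw.toList (k : Int) = -1 :=
      fun kw => findFrom_past l kw.toList k (by omega)
    have hnil : positions = [] := by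
      rw [hposdef]
      simp [hall]
    rw [hnil, fncScan_past l (keywords.map String.toList) k (by omega)]
    simp [PySem.List.min?, hlen]

-- ===== VERDICT (by name: the statement is the Claim_ definition above) =====
theorem find_next_clause_py_spec : Claim_equal_find_next_clause_py := by
  intro query start_pos keywords _ hpre
  unfold Pre_find_next_clause_py at hpre
  unfold Spec_find_next_clause_py find_next_clause_py_alt
  simp only [PySem.Str.toList_upper]
  by_cases h0 : 0 ≤ start_pos
  · have hs : start_pos = ((start_pos.toNat : Nat) : Int) := by omega
    have hm : (max start_pos 0).toNat = start_pos.toNat := by omega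
    rw [hm, hs]
    exact fnc_core query keywords start_pos.toNat
  · have hneg : start_pos + (query.toList.length : Int) ≤ 0 := by
      rcases hpre with h | h
      · omega
      · exact h
    have hm : (max start_pos 0).toNat = 0 := by omega
    rw [hm, find_neg_eq_zero query start_pos keywords hneg]
    exact fnc_core query keywords 0
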